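-- pv_equiv track=rewrite | github.com/Shiny-lab/Millenium-RAT | incendio.py | propagacion
-- ===== SOURCE A (Python) =====
-- def propagacion(bosque):
--     bosque1 = bosque.copy()
--     for a in range(len(bosque)):
--         for i in range(len(bosque1)):
--             if(bosque1[i] == 1):
--                 if(i != (len(bosque1)-1)):
--                     if(bosque1[i+1] == -1):
--                         bosque1[i] = -1
--                 if(i != 0):
--                     if(bosque1[i-1] == -1):
--                         bosque1[i] = -1
--     return bosque1
-- ===== SOURCE B (Python) =====
-- def propagacion(bosque):
--     res = []
--     prev = None
--     for x in bosque:
--         y = -1 if (x == 1 and prev == -1) else x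
--         res.append(y)
--         prev = y
--     out = []
--     prev = None
--     for x in reversed(res):
--         y = -1 if (x == 1 and prev == -1) else x
--         out.append(y)
--         prev = y
--     out.reverse()
--     return out
-- ===== Notes on version B (the rewrite author's own statement) =====
-- stated objective: faster
-- what changed: Replaces A's len(bosque) repeated full quadratic sweeps with exactly two linear sweeps (left-to-right then right-to-left over the reversed list), since fire in a run of 1s spreads fully rightward in one forward sweep and fully leftward in one backward sweep.
import Mathlib
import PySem

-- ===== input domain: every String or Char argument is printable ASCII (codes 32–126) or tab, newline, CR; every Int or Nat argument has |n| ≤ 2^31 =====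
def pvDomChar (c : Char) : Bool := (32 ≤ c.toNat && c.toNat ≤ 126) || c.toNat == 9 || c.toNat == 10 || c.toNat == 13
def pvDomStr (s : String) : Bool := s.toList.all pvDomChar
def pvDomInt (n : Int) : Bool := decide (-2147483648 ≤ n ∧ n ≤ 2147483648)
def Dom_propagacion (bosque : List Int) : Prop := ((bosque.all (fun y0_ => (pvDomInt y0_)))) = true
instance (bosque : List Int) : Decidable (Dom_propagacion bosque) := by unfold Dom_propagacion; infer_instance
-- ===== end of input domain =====

-- B replaces A's len(bosque) full (quadratic) fire-spreading passes by two linear sweeps: faster (asymptotic).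

-- ===== PORT A =====
-- one step of A's inner loop at index i (i comes from range(len), so reads/writes are in range)
def aStep (s : List Int) (i : Int) : List Int :=
  if PySem.List.pyGetD s i 0 = 1 then
    let s1 := if i ≠ (s.length : Int) - 1 then
        (if PySem.List.pyGetD s (i + 1) 0 = -1 then PySem.List.pySetD s i (-1) else s)
      else s
    if i ≠ 0 then
      (if PySem.List.pyGetD s1 (i - 1) 0 = -1 then PySem.List.pySetD s1 i (-1) else s1)
    else s1
  else s

-- A's inner loop: for i in range(len(bosque1))
def aPass (s : List Int) : List Int := (PySem.List.pyRange 0 (s.length : Int) 1).foldl aStep s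

-- A's outer loop: for a in range(len(bosque)), body = one inner pass
def propagacion (bosque : List Int) : List Int :=
  (PySem.List.pyRange 0 (bosque.length : Int) 1).foldl (fun s _ => aPass s) bosque

-- ===== PORT B =====
-- one sweep step: y = -1 if (x == 1 and prev == -1) else x; append y; prev = y
def sweepStep (st : List Int × Option Int) (x : Int) : List Int × Option Int :=
  let y := if x = 1 ∧ st.2 = some (-1) then -1 else x
  (st.1 ++ [y], some y)

-- one sweep: res = []; prev = None; for x in l: ...
def sweep (l : List Int) : List Int := (l.foldl sweepStep ([], none)).1

def propagacion_alt (bosque : List Int) : List Int :=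
  (sweep ((sweep bosque).reverse)).reverse

-- ===== PRECONDITION & SPEC =====
def Spec_propagacion (bosque : List Int) (out : List Int) : Prop := out = propagacion_alt bosque
instance (bosque : List Int) (out : List Int) : Decidable (Spec_propagacion bosque out) := by unfold Spec_propagacion; infer_instance

-- ===== CLAIM (what is proved, stated in full; the proofs are below) =====
def Claim_equal_propagacion : Prop := ∀ (bosque : List Int), Dom_propagacion bosque → Spec_propagacion bosque (propagacion bosque)

-- ===== LEMMAS AND PROOFS =====

-- value of b at index i (all accesses in the proofs are in range)
abbrev gd (b : List Int) (i : ℕ) : Int := b.getD i 0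
-- i is reachable by fire from a -1 strictly to its left through cells equal to 1
abbrev Lsrc (b : List Int) (i : ℕ) : Prop := ∃ j < i, gd b j = -1 ∧ ∀ k < i, j < k → gd b k = 1
-- there is a -1 exactly d to the right of i, with only 1s strictly in between
abbrev Rdist (b : List Int) (i d : ℕ) : Prop :=
  i + d < b.length ∧ gd b (i + d) = -1 ∧ ∀ t < d, 0 < t → gd b (i + t) = 1
-- i is reachable by fire from a -1 strictly to its right through cells equal to 1
abbrev RsrcP (b : List Int) (i : ℕ) : Prop := ∃ j < b.length, i < j ∧ gd b j = -1 ∧ ∀ k < j, i < k → gd b k = 1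
-- cell i is -1 after k passes of A: originally -1, or a 1 with a left source (burns in pass 1)
-- or a right source within distance k (leftward fire moves one cell per pass)
abbrev burned (b : List Int) (k i : ℕ) : Prop :=
  gd b i = -1 ∨ (gd b i = 1 ∧ ((1 ≤ k ∧ Lsrc b i) ∨ ∃ d < k + 1, 0 < d ∧ Rdist b i d))
-- the value of cell i after k passes
def w (b : List Int) (k i : ℕ) : Int := if burned b k i then -1 else gd b i
-- the state after k passes
def wlist (b : List Int) (k : ℕ) : List Int := (List.range b.length).map (w b k)

-- structural version of A's inner pass: p = value just written at the left neighbour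
def passGo (p : Option Int) : List Int → List Int
  | [] => []
  | x :: xs =>
    let y := if x = 1 ∧ (p = some (-1) ∨ xs.head? = some (-1)) then (-1 : Int) else x
    y :: passGo (some y) xs

-- structural version of B's sweep
def sweepRec (p : Option Int) : List Int → List Int
  | [] => []
  | x :: xs =>
    let y := if x = 1 ∧ p = some (-1) then (-1 : Int) else x
    y :: sweepRec (some y) xs

-- value after the forward sweep
def rv (b : List Int) (i : ℕ) : Int := if gd b i = 1 ∧ Lsrc b i then -1 else gd b i
-- forward-sweep value with an initial prev p
def fval (p : Option Int) (l : List Int) (i : ℕ) : Int :=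
  if gd l i = 1 ∧ (Lsrc l i ∨ (p = some (-1) ∧ ∀ j < i, gd l j = 1)) then -1 else gd l i

-- ---------- B-side bridges ----------

theorem sweep_foldl (l : List Int) : ∀ (acc : List Int) (p : Option Int),
    (l.foldl sweepStep (acc, p)).1 = acc ++ sweepRec p l := by
  induction l with
  | nil => simp [sweepRec]
  | cons x xs ih =>
    intro acc p
    simp only [List.foldl_cons, sweepStep, sweepRec]
    rw [ih]
    simp

theorem sweep_eq (l : List Int) : sweep l = sweepRec none l := by
  simpa using sweep_foldl l [] none

theorem foldl_const_iterate (f : List Int → List Int) (l : List Int) : ∀ (s : List Int),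
    l.foldl (fun s _ => f s) s = f^[l.length] s := by
  induction l with
  | nil => simp
  | cons x xs ih => intro s; simp [ih, Function.iterate_succ_apply]

theorem burned_mono {b : List Int} {k i : ℕ} (h : burned b k i) : burned b (k + 1) i := by
  rcases h with h | ⟨h1, h2 | ⟨d, hd, hd0, hr⟩⟩
  · exact Or.inl h
  · exact Or.inr ⟨h1, Or.inl ⟨by omega, h2.2⟩⟩
  · exact Or.inr ⟨h1, Or.inr ⟨d, by omega, hd0, hr⟩⟩

theorem w_neg_iff (b : List Int) (k i : ℕ) : w b k i = -1 ↔ burned b k i := by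
  unfold w
  split_ifs with h
  · simp [h]
  · constructor
    · intro hg; exact absurd (Or.inl hg) h
    · intro hc; exact absurd hc h

theorem w_one_iff (b : List Int) (k i : ℕ) : w b k i = 1 ↔ gd b i = 1 ∧ ¬ burned b k i := by
  unfold w
  split_ifs with h
  · constructor
    · intro hc; exact absurd hc (by norm_num)
    · intro ⟨_, hn⟩; exact absurd h hn
  · exact ⟨fun hg => ⟨hg, h⟩, fun ⟨hg, _⟩ => hg⟩

theorem wlist_zero (b : List Int) : wlist b 0 = b := by
  unfold wlist
  apply List.ext_getElem
  · simp
  · intro i h1 h2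
    simp only [List.getElem_map, List.getElem_range]
    have hi : i < b.length := by simpa using h1
    unfold w
    have : ¬ burned b 0 i ∨ gd b i = -1 := by
      by_cases hb : burned b 0 i
      · rcases hb with h | ⟨_, ⟨hk, _⟩ | ⟨d, hd, hd0, _⟩⟩
        · exact Or.inr h
        · omega
        · omega
      · exact Or.inl hb
    rcases this with h | h
    · rw [if_neg h]; simp [gd, List.getD, hi]
    · rw [if_pos (Or.inl h), ← h]; simp [gd, List.getD, hi]

theorem fval_shift (x : Int) (xs : List Int) (p : Option Int) (i : ℕ) :
    (Lsrc xs i ∨ ((some (if x = 1 ∧ p = some (-1) then (-1:Int) else x)) = some (-1) ∧ ∀ j < i, gd xs j = 1))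
      ↔ (Lsrc (x :: xs) (i+1) ∨ (p = some (-1) ∧ ∀ j < i + 1, gd (x :: xs) j = 1)) := by
  constructor
  · rintro (⟨j, hj, hneg, hall⟩ | ⟨hy, hall⟩)
    · refine Or.inl ⟨j + 1, by omega, by simpa [gd] using hneg, ?_⟩
      intro k hk hjk
      obtain ⟨k', rfl⟩ : ∃ k', k = k' + 1 := ⟨k - 1, by omega⟩
      simpa [gd] using hall k' (by omega) (by omega)
    · by_cases hc : x = 1 ∧ p = some (-1)
      · refine Or.inr ⟨hc.2, ?_⟩
        intro j hj
        cases j with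
        | zero => simpa [gd] using hc.1
        | succ j' => simpa [gd] using hall j' (by omega)
      · rw [if_neg hc] at hy
        simp only [Option.some.injEq] at hy
        refine Or.inl ⟨0, by omega, by simpa [gd] using hy, ?_⟩
        intro k hk h0k
        obtain ⟨k', rfl⟩ : ∃ k', k = k' + 1 := ⟨k - 1, by omega⟩
        simpa [gd] using hall k' (by omega)
  · rintro (⟨j, hj, hneg, hall⟩ | ⟨hp, hall⟩)
    · cases j with
      | zero =>
        have hx : x = -1 := by simpa [gd] using hneg
        refine Or.inr ⟨?_, ?_⟩
        · rw [if_neg (by simp [hx])]; simp [hx]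
        · intro j hj'
          simpa [gd] using hall (j + 1) (by omega) (by omega)
      | succ j' =>
        refine Or.inl ⟨j', by omega, by simpa [gd] using hneg, ?_⟩
        intro k hk hjk
        simpa [gd] using hall (k + 1) (by omega) (by omega)
    · have hx : x = 1 := by simpa [gd] using hall 0 (by omega)
      refine Or.inr ⟨by rw [if_pos ⟨hx, hp⟩], ?_⟩
      intro j hj
      simpa [gd] using hall (j + 1) (by omega)

theorem sweepRec_char (l : List Int) : ∀ p, sweepRec p l = (List.range l.length).map (fval p l) := by
  induction l with
  | nil => intro p; simp [sweepRec]
  | cons x xs ih =>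
    intro p
    simp only [sweepRec, ih, List.length_cons, List.range_succ_eq_map, List.map_cons, List.map_map]
    congr 1
    · unfold fval
      have hns : ¬ Lsrc (x :: xs) 0 := by rintro ⟨j, hj, -⟩; omega
      simp [gd, hns]
    · apply List.map_congr_left
      intro i _
      simp only [Function.comp_apply]
      unfold fval
      rw [show (Nat.succ i) = i + 1 from rfl]
      by_cases hg1 : gd xs i = 1
      · have hgl : gd (x :: xs) (i+1) = 1 := by simpa [gd] using hg1
        rw [hgl, hg1]
        by_cases hc : Lsrc xs i ∨ ((some (if x = 1 ∧ p = some (-1) then (-1:Int) else x)) = some (-1) ∧ ∀ j < i, gd xs j = 1)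
        · rw [if_pos ⟨rfl, hc⟩, if_pos ⟨rfl, (fval_shift x xs p i).mp hc⟩]
        · rw [if_neg (fun h => hc h.2), if_neg (fun h => hc ((fval_shift x xs p i).mpr h.2))]
      · have hgl : ¬ (gd (x :: xs) (i+1) = 1) := by simpa [gd] using hg1
        rw [if_neg (fun h => hg1 h.1), if_neg (fun h => hgl h.1)]
        simp [gd]

theorem sweep_char (b : List Int) : sweep b = (List.range b.length).map (rv b) := by
  rw [sweep_eq, sweepRec_char]
  apply List.map_congr_left
  intro i _
  unfold fval rv
  simp

theorem getD_append_self (pre : List Int) (x : Int) (xs : List Int) :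
    (pre ++ x :: xs).getD pre.length 0 = x := by
  rw [List.getD_append_right _ _ _ _ le_rfl]
  simp

theorem set_append_self (pre : List Int) (x v : Int) (xs : List Int) :
    (pre ++ x :: xs).set pre.length v = pre ++ v :: xs := by
  rw [List.set_append]
  simp

theorem getD_append_last (pre l : List Int) (h : pre ≠ []) :
    (pre ++ l).getD (pre.length - 1) 0 = pre.getLast h := by
  have hp : 0 < pre.length := List.length_pos_of_ne_nil h
  rw [List.getD_append _ _ _ _ (by omega), List.getD_eq_getElem _ _ (by omega), List.getLast_eq_getElem]

theorem aStep_eval (pre : List Int) (x : Int) (xs : List Int) :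
    aStep (pre ++ x :: xs) (pre.length : Int) =
      pre ++ (if x = 1 ∧ (pre.getLast? = some (-1) ∨ xs.head? = some (-1)) then (-1 : Int) else x) :: xs := by
  have e1 : PySem.List.pyGetD (pre ++ x :: xs) (pre.length : Int) 0 = x := by
    rw [PySem.List.pyGetD_natCast, getD_append_self]
  unfold aStep
  rw [e1]
  by_cases hx : x = 1
  · rw [if_pos hx]
    cases xs with
    | nil =>
      rw [if_neg (show ¬((pre.length : Int) ≠ ((pre ++ [x]).length : Int) - 1) by
        push_cast [List.length_append, List.length_cons, List.length_nil]; omega)]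
      by_cases hpre : pre = []
      · subst hpre
        rw [if_neg (by simp)]
        simp
      · have hp0 : 0 < pre.length := List.length_pos_of_ne_nil hpre
        have e6 : PySem.List.pyGetD (pre ++ x :: ([] : List Int)) ((pre.length : Int) - 1) 0 = pre.getLast hpre := by
          rw [show (pre.length : Int) - 1 = ((pre.length - 1 : ℕ) : Int) by omega,
            PySem.List.pyGetD_natCast, getD_append_last pre _ hpre]
        rw [if_pos (show (pre.length : Int) ≠ 0 by omega), e6]
        by_cases hl : pre.getLast hpre = -1
        · rw [if_pos hl, PySem.List.pySetD_natCast, set_append_self]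
          simp [List.getLast?_eq_some_getLast hpre, hl, hx]
        · rw [if_neg hl]
          simp [List.getLast?_eq_some_getLast hpre, hl, hx]
    | cons x' xs' =>
      have e3 : PySem.List.pyGetD (pre ++ x :: x' :: xs') ((pre.length : Int) + 1) 0 = x' := by
        rw [show (pre.length : Int) + 1 = ((pre.length + 1 : ℕ) : Int) by omega,
          PySem.List.pyGetD_natCast, List.getD_append_right _ _ _ _ (by omega)]
        simp
      rw [if_pos (show (pre.length : Int) ≠ ((pre ++ x :: x' :: xs').length : Int) - 1 by
        push_cast [List.length_append, List.length_cons, List.length_nil]; omega), e3]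
      by_cases hx' : x' = -1
      · rw [if_pos hx', PySem.List.pySetD_natCast, set_append_self]
        by_cases hpre : pre = []
        · subst hpre
          rw [if_neg (by simp)]
          simp [hx, hx']
        · have hp0 : 0 < pre.length := List.length_pos_of_ne_nil hpre
          have e6 : PySem.List.pyGetD (pre ++ (-1) :: x' :: xs') ((pre.length : Int) - 1) 0 = pre.getLast hpre := by
            rw [show (pre.length : Int) - 1 = ((pre.length - 1 : ℕ) : Int) by omega,
              PySem.List.pyGetD_natCast, getD_append_last pre _ hpre]
          rw [if_pos (show (pre.length : Int) ≠ 0 by omega), e6]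
          by_cases hl : pre.getLast hpre = -1
          · rw [if_pos hl, PySem.List.pySetD_natCast, set_append_self]
            simp [hx, hx']
          · rw [if_neg hl]
            simp [hx, hx']
      · rw [if_neg hx']
        by_cases hpre : pre = []
        · subst hpre
          rw [if_neg (by simp)]
          simp [hx, hx']
        · have hp0 : 0 < pre.length := List.length_pos_of_ne_nil hpre
          have e6 : PySem.List.pyGetD (pre ++ x :: x' :: xs') ((pre.length : Int) - 1) 0 = pre.getLast hpre := by
            rw [show (pre.length : Int) - 1 = ((pre.length - 1 : ℕ) : Int) by omega,
              PySem.List.pyGetD_natCast, getD_append_last pre _ hpre]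
          rw [if_pos (show (pre.length : Int) ≠ 0 by omega), e6]
          by_cases hl : pre.getLast hpre = -1
          · rw [if_pos hl, PySem.List.pySetD_natCast, set_append_self]
            simp [List.getLast?_eq_some_getLast hpre, hl, hx, hx']
          · rw [if_neg hl]
            simp [List.getLast?_eq_some_getLast hpre, hl, hx, hx']
  · rw [if_neg hx, if_neg (by simp [hx])]

theorem aPass_split (post : List Int) : ∀ (pre : List Int),
    (PySem.List.pyRange (pre.length : Int) ((pre.length + post.length : ℕ) : Int) 1).foldl aStep (pre ++ post)
      = pre ++ passGo pre.getLast? post := by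
  induction post with
  | nil =>
    intro pre
    simp [passGo]
  | cons x xs ih =>
    intro pre
    rw [PySem.List.pyRange_one_cons (by push_cast [List.length_cons]; omega), List.foldl_cons, aStep_eval]
    have h1 : pre ++ (if x = 1 ∧ (pre.getLast? = some (-1) ∨ xs.head? = some (-1)) then (-1:Int) else x) :: xs
        = (pre ++ [(if x = 1 ∧ (pre.getLast? = some (-1) ∨ xs.head? = some (-1)) then (-1:Int) else x)]) ++ xs := by
      simp
    have h2 : ((pre.length : Int) + 1) = (((pre ++ [(if x = 1 ∧ (pre.getLast? = some (-1) ∨ xs.head? = some (-1)) then (-1:Int) else x)]).length : Int)) := by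
      simp
    have h3 : ((pre.length + (x :: xs).length : ℕ) : Int)
        = (((pre ++ [(if x = 1 ∧ (pre.getLast? = some (-1) ∨ xs.head? = some (-1)) then (-1:Int) else x)]).length + xs.length : ℕ) : Int) := by
      push_cast [List.length_append, List.length_cons, List.length_nil]
      ring
    rw [h1, h2, h3, ih, List.getLast?_concat]
    simp [passGo]

theorem aPass_eq (s : List Int) : aPass s = passGo none s := by
  have h := aPass_split s []
  simpa [aPass] using h

theorem propagacion_eq_iterate (b : List Int) : propagacion b = (fun s => passGo none s)^[b.length] b := by
  unfold propagacion
  rw [foldl_const_iterate aPass]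
  have hlen : (PySem.List.pyRange 0 (b.length : Int) 1).length = b.length := by
    rw [PySem.List.length_pyRange_one]
    simp
  rw [hlen]
  have hfun : ∀ (k : ℕ) (s : List Int), aPass^[k] s = (fun s => passGo none s)^[k] s := by
    intro k
    induction k with
    | zero => intro s; simp
    | succ k ihk => intro s; simp [Function.iterate_succ_apply, aPass_eq, ihk]
  exact hfun _ _

theorem burned_succ_iff (b : List Int) (k i : ℕ) (hi : i < b.length) :
    burned b (k + 1) i ↔ burned b k i ∨
      (gd b i = 1 ∧ ((0 < i ∧ burned b (k + 1) (i - 1)) ∨ (i + 1 < b.length ∧ burned b k (i + 1)))) := by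
  constructor
  · rintro (h | ⟨h1, ⟨-, j, hj, hneg, hall⟩ | ⟨d, hd, hd0, hlen, hneg, hall⟩⟩)
    · exact Or.inl (Or.inl h)
    · -- left source: the cell just left of i is burned at pass k+1
      refine Or.inr ⟨h1, Or.inl ⟨by omega, ?_⟩⟩
      by_cases hje : j = i - 1
      · exact Or.inl (hje ▸ hneg)
      · refine Or.inr ⟨hall (i-1) (by omega) (by omega), Or.inl ⟨by omega, j, by omega, hneg, ?_⟩⟩
        intro k' hk' hjk'
        exact hall k' (by omega) hjk'
    · by_cases hdk : d ≤ k
      · exact Or.inl (Or.inr ⟨h1, Or.inr ⟨d, by omega, hd0, hlen, hneg, hall⟩⟩)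
      · -- d = k+1
        by_cases hd1 : d = 1
        · subst hd1
          exact Or.inr ⟨h1, Or.inr ⟨by omega, Or.inl hneg⟩⟩
        · refine Or.inr ⟨h1, Or.inr ⟨by omega, Or.inr ⟨hall 1 (by omega) (by omega), Or.inr ⟨d - 1, by omega, by omega, by omega, ?_, ?_⟩⟩⟩⟩
          · have he : i + 1 + (d - 1) = i + d := by omega
            rw [he]; exact hneg
          · intro t ht ht0
            have he : i + 1 + t = i + (t + 1) := by omega
            rw [he]; exact hall (t+1) (by omega) (by omega)
  · rintro (h | ⟨h1, ⟨hipos, hbprev⟩ | ⟨hilt, hbnext⟩⟩)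
    · exact burned_mono h
    · rcases hbprev with hpn | ⟨hp1, ⟨-, j, hj, hneg, hall⟩ | ⟨d, hd, hd0, hlen, hneg, hall⟩⟩
      · refine Or.inr ⟨h1, Or.inl ⟨by omega, i - 1, by omega, hpn, ?_⟩⟩
        intro k' hk' hik'
        omega
      · refine Or.inr ⟨h1, Or.inl ⟨by omega, j, by omega, hneg, ?_⟩⟩
        intro k' hk' hjk'
        rcases Nat.lt_or_ge k' (i - 1) with h' | h'
        · exact hall k' h' hjk'
        · have he : k' = i - 1 := by omega
          rw [he]; exact hp1
      · by_cases hd1 : d = 1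
        · subst hd1
          have he : i - 1 + 1 = i := by omega
          rw [he] at hneg
          rw [h1] at hneg
          norm_num at hneg
        · refine Or.inr ⟨h1, Or.inr ⟨d - 1, by omega, by omega, by omega, ?_, ?_⟩⟩
          · have he : i + (d - 1) = i - 1 + d := by omega
            rw [he]; exact hneg
          · intro t ht ht0
            have he : i + t = i - 1 + (t + 1) := by omega
            rw [he]; exact hall (t+1) (by omega) (by omega)
    · rcases hbnext with hpn | ⟨hp1, ⟨hk1, j, hj, hneg, hall⟩ | ⟨d, hd, hd0, hlen, hneg, hall⟩⟩
      · refine Or.inr ⟨h1, Or.inr ⟨1, by omega, by omega, by omega, by simpa using hpn, by omega⟩⟩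
      · have hji : j ≠ i := by
          intro he
          rw [he, h1] at hneg
          norm_num at hneg
        refine Or.inr ⟨h1, Or.inl ⟨by omega, j, by omega, hneg, ?_⟩⟩
        intro k' hk' hjk'
        exact hall k' (by omega) hjk'
      · refine Or.inr ⟨h1, Or.inr ⟨d + 1, by omega, by omega, by omega, ?_, ?_⟩⟩
        · have he : i + (d + 1) = i + 1 + d := by omega
          rw [he]; exact hneg
        · intro t ht ht0
          by_cases ht1 : t = 1
          · subst ht1; simpa using hp1
          · have he : i + t = i + 1 + (t - 1) := by omega
            rw [he]; exact hall (t-1) (by omega) (by omega)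

theorem w_succ_eq (b : List Int) (k i : ℕ) (hi : i < b.length) :
    w b (k + 1) i = if w b k i = 1 ∧ ((0 < i ∧ w b (k + 1) (i - 1) = -1) ∨ (i + 1 < b.length ∧ w b k (i + 1) = -1))
      then -1 else w b k i := by
  by_cases hbk : burned b k i
  · rw [(w_neg_iff b (k+1) i).mpr (burned_mono hbk),
      if_neg (fun hc => ((w_one_iff b k i).mp hc.1).2 hbk),
      (w_neg_iff b k i).mpr hbk]
  · have hwk : w b k i = gd b i := by unfold w; rw [if_neg hbk]
    by_cases hg : gd b i = 1
    · have hcond : (w b k i = 1 ∧ ((0 < i ∧ w b (k + 1) (i - 1) = -1) ∨ (i + 1 < b.length ∧ w b k (i + 1) = -1)))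
          ↔ ((0 < i ∧ burned b (k+1) (i-1)) ∨ (i + 1 < b.length ∧ burned b k (i+1))) := by
        constructor
        · rintro ⟨-, ⟨h0, hw⟩ | ⟨h0, hw⟩⟩
          · exact Or.inl ⟨h0, (w_neg_iff _ _ _).mp hw⟩
          · exact Or.inr ⟨h0, (w_neg_iff _ _ _).mp hw⟩
        · rintro (⟨h0, hb⟩ | ⟨h0, hb⟩)
          · exact ⟨(w_one_iff _ _ _).mpr ⟨hg, hbk⟩, Or.inl ⟨h0, (w_neg_iff _ _ _).mpr hb⟩⟩
          · exact ⟨(w_one_iff _ _ _).mpr ⟨hg, hbk⟩, Or.inr ⟨h0, (w_neg_iff _ _ _).mpr hb⟩⟩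
      by_cases hC : ((0 < i ∧ burned b (k+1) (i-1)) ∨ (i + 1 < b.length ∧ burned b k (i+1)))
      · rw [if_pos (hcond.mpr hC)]
        exact (w_neg_iff _ _ _).mpr ((burned_succ_iff b k i hi).mpr (Or.inr ⟨hg, hC⟩))
      · rw [if_neg (fun hc => hC (hcond.mp hc))]
        have hnb : ¬ burned b (k+1) i := by
          intro hb
          rcases (burned_succ_iff b k i hi).mp hb with h | ⟨-, h⟩
          · exact hbk h
          · exact hC h
        unfold w
        rw [if_neg hnb, if_neg hbk]
    · have hnb : ¬ burned b (k+1) i := by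
        intro hb
        rcases (burned_succ_iff b k i hi).mp hb with h | ⟨h1, -⟩
        · exact hbk h
        · exact hg h1
      rw [if_neg (fun hc => hg (((w_one_iff b k i).mp hc.1).1))]
      unfold w
      rw [if_neg hnb, if_neg hbk]

theorem passGo_w (b : List Int) (k : ℕ) : ∀ (t m : ℕ) (p : Option Int), m + t = b.length →
    p = (if m = 0 then none else some (w b (k + 1) (m - 1))) →
    passGo p ((List.range' m t).map (w b k)) = (List.range' m t).map (w b (k + 1)) := by
  intro t
  induction t with
  | zero => intro m p _ _; simp [passGo]
  | succ t iht =>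
    intro m p hmt hp
    rw [List.range'_succ, List.map_cons, List.map_cons]
    have hhead : ((List.range' (m+1) t).map (w b k)).head? = if t = 0 then none else some (w b k (m+1)) := by
      cases t with
      | zero => simp
      | succ t' => simp [List.range'_succ]
    have hm : m < b.length := by omega
    have hy : (if w b k m = 1 ∧ (p = some (-1) ∨ ((List.range' (m+1) t).map (w b k)).head? = some (-1)) then (-1:Int) else w b k m)
        = w b (k+1) m := by
      rw [w_succ_eq b k m hm]
      have hiff : (p = some (-1) ∨ ((List.range' (m+1) t).map (w b k)).head? = some (-1))
          ↔ ((0 < m ∧ w b (k + 1) (m - 1) = -1) ∨ (m + 1 < b.length ∧ w b k (m + 1) = -1)) := by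
        rw [hp, hhead]
        constructor
        · rintro (hl | hr)
          · by_cases hm0 : m = 0
            · rw [if_pos hm0] at hl; exact absurd hl (by simp)
            · rw [if_neg hm0] at hl
              exact Or.inl ⟨by omega, by simpa using hl⟩
          · by_cases ht0 : t = 0
            · rw [if_pos ht0] at hr; exact absurd hr (by simp)
            · rw [if_neg ht0] at hr
              exact Or.inr ⟨by omega, by simpa using hr⟩
        · rintro (⟨h0, hw⟩ | ⟨h0, hw⟩)
          · exact Or.inl (by rw [if_neg (by omega)]; simpa using hw)
          · exact Or.inr (by rw [if_neg (show ¬ t = 0 by omega)]; simpa using hw)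
      by_cases hc : w b k m = 1 ∧ ((0 < m ∧ w b (k + 1) (m - 1) = -1) ∨ (m + 1 < b.length ∧ w b k (m + 1) = -1))
      · rw [if_pos hc, if_pos ⟨hc.1, hiff.mpr hc.2⟩]
      · rw [if_neg hc, if_neg (fun hcc => hc ⟨hcc.1, hiff.mp hcc.2⟩)]
    simp only [passGo]
    rw [hy]
    congr 1
    exact iht (m+1) (some (w b (k+1) m)) (by omega) (by rw [if_neg (by omega)]; norm_num)

theorem passGo_wlist (b : List Int) (k : ℕ) : passGo none (wlist b k) = wlist b (k + 1) := by
  unfold wlist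
  rw [List.range_eq_range']
  exact passGo_w b k b.length 0 none (by omega) (by simp)

theorem iterate_w (b : List Int) : ∀ k, (fun s => passGo none s)^[k] b = wlist b k := by
  intro k
  induction k with
  | zero => simp [wlist_zero]
  | succ k ih => rw [Function.iterate_succ_apply', ih, passGo_wlist]

theorem A_char (b : List Int) : propagacion b = wlist b b.length := by
  rw [propagacion_eq_iterate, iterate_w]

theorem burned_len_iff (b : List Int) (i : ℕ) (hi : i < b.length) :
    burned b b.length i ↔ gd b i = -1 ∨ (gd b i = 1 ∧ (Lsrc b i ∨ RsrcP b i)) := by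
  constructor
  · rintro (h | ⟨h1, ⟨-, hL⟩ | ⟨d, hd, hd0, hlen, hneg, hall⟩⟩)
    · exact Or.inl h
    · exact Or.inr ⟨h1, Or.inl hL⟩
    · refine Or.inr ⟨h1, Or.inr ⟨i + d, hlen, by omega, hneg, ?_⟩⟩
      intro k hk hik
      have he : i + (k - i) = k := by omega
      have := hall (k - i) (by omega) (by omega)
      rwa [he] at this
  · rintro (h | ⟨h1, hL | ⟨j, hjlen, hij, hneg, hall⟩⟩)
    · exact Or.inl h
    · exact Or.inr ⟨h1, Or.inl ⟨by omega, hL⟩⟩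
    · refine Or.inr ⟨h1, Or.inr ⟨j - i, by omega, by omega, by omega, ?_, ?_⟩⟩
      · have he : i + (j - i) = j := by omega
        rw [he]; exact hneg
      · intro t ht ht0
        exact hall (i + t) (by omega) (by omega)

theorem gd_reverse (l : List Int) (j : ℕ) (hj : j < l.length) :
    gd l.reverse j = gd l (l.length - 1 - j) := by
  unfold gd
  rw [List.getD_eq_getElem _ _ (by simpa using hj), List.getD_eq_getElem _ _ (by omega),
    List.getElem_reverse]

theorem Lsrc_reverse (l : List Int) (t : ℕ) (ht : t < l.length) :
    Lsrc l.reverse t ↔ RsrcP l (l.length - 1 - t) := by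
  constructor
  · rintro ⟨j, hjt, hneg, hall⟩
    rw [gd_reverse l j (by omega)] at hneg
    refine ⟨l.length - 1 - j, by omega, by omega, hneg, ?_⟩
    intro k' hk' hik'
    have h2 := hall (l.length - 1 - k') (by omega) (by omega)
    rw [gd_reverse l _ (by omega)] at h2
    rwa [show l.length - 1 - (l.length - 1 - k') = k' by omega] at h2
  · rintro ⟨j, hjn, hij, hneg, hall⟩
    refine ⟨l.length - 1 - j, by omega, ?_, ?_⟩
    · rw [gd_reverse l _ (by omega), show l.length - 1 - (l.length - 1 - j) = j by omega]
      exact hneg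
    · intro k hk hjk
      rw [gd_reverse l k (by omega)]
      exact hall (l.length - 1 - k) (by omega) (by omega)

theorem rv_one (b : List Int) (k : ℕ) (h : rv b k = 1) : gd b k = 1 := by
  unfold rv at h
  by_cases hc : gd b k = 1 ∧ Lsrc b k
  · rw [if_pos hc] at h; norm_num at h
  · rwa [if_neg hc] at h

theorem res_getD (b : List Int) (k : ℕ) (hk : k < b.length) :
    gd ((List.range b.length).map (rv b)) k = rv b k := by
  unfold gd
  rw [List.getD_eq_getElem _ _ (by simpa using hk)]
  simp

theorem RsrcP_res_iff (b : List Int) (i : ℕ) (_hi : i < b.length) (h1 : gd b i = 1) (hL : ¬ Lsrc b i) :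
    RsrcP ((List.range b.length).map (rv b)) i ↔ RsrcP b i := by
  have hlr : ((List.range b.length).map (rv b)).length = b.length := by simp
  constructor
  · rintro ⟨j, hjn, hij, hneg, hall⟩
    rw [hlr] at hjn
    rw [res_getD b j hjn] at hneg
    have hbj : gd b j = -1 := by
      by_cases hc : gd b j = 1 ∧ Lsrc b j
      · obtain ⟨j'', hj''j, hneg'', hall''⟩ := hc.2
        exfalso
        rcases Nat.lt_trichotomy j'' i with h' | h' | h'
        · exact hL ⟨j'', h', hneg'', fun k hk hjk => hall'' k (by omega) hjk⟩
        · rw [← h', hneg''] at h1; norm_num at h1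
        · have := hall j'' (by omega) (by omega)
          rw [res_getD b j'' (by omega)] at this
          rw [rv_one b j'' this] at hneg''
          norm_num at hneg''
      · unfold rv at hneg
        rwa [if_neg hc] at hneg
    refine ⟨j, hjn, hij, hbj, ?_⟩
    intro k hk hik
    have := hall k (by omega) hik
    rw [res_getD b k (by omega)] at this
    exact rv_one b k this
  · rintro ⟨j, hjn, hij, hneg, hall⟩
    refine ⟨j, by rw [hlr]; omega, hij, ?_, ?_⟩
    · rw [res_getD b j hjn]
      unfold rv
      rw [if_neg (by rw [hneg]; norm_num)]
      exact hneg
    · intro k hk hik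
      rw [res_getD b k (by omega)]
      have hgk : gd b k = 1 := hall k hk hik
      have hnL : ¬ Lsrc b k := by
        rintro ⟨j'', hj''k, hneg'', hall''⟩
        rcases Nat.lt_trichotomy j'' i with h' | h' | h'
        · exact hL ⟨j'', h', hneg'', fun k' hk' hjk' => hall'' k' (by omega) hjk'⟩
        · rw [← h', hneg''] at h1; norm_num at h1
        · rw [hall j'' (by omega) (by omega)] at hneg''
          norm_num at hneg''
      unfold rv
      rw [if_neg (fun hc => hnL hc.2)]
      exact hgk

theorem final_val (b : List Int) (i : ℕ) (hi : i < b.length) :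
    (if rv b i = 1 ∧ RsrcP ((List.range b.length).map (rv b)) i then -1 else rv b i) = w b b.length i := by
  by_cases hg1 : gd b i = 1
  · by_cases hLs : Lsrc b i
    · have hrv : rv b i = -1 := by unfold rv; rw [if_pos ⟨hg1, hLs⟩]
      rw [if_neg (by rw [hrv]; norm_num), hrv,
        (w_neg_iff b b.length i).mpr ((burned_len_iff b i hi).mpr (Or.inr ⟨hg1, Or.inl hLs⟩))]
    · have hrv : rv b i = gd b i := by unfold rv; rw [if_neg (fun hc => hLs hc.2)]
      by_cases hRs : RsrcP b i
      · rw [if_pos ⟨by rw [hrv, hg1], (RsrcP_res_iff b i hi hg1 hLs).mpr hRs⟩,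
          (w_neg_iff b b.length i).mpr ((burned_len_iff b i hi).mpr (Or.inr ⟨hg1, Or.inr hRs⟩))]
      · rw [if_neg (fun hc => hRs ((RsrcP_res_iff b i hi hg1 hLs).mp hc.2)), hrv]
        have hnb : ¬ burned b b.length i := by
          intro hb
          rcases (burned_len_iff b i hi).mp hb with h | ⟨-, hL | hR⟩
          · rw [hg1] at h; norm_num at h
          · exact hLs hL
          · exact hRs hR
        unfold w
        rw [if_neg hnb]
  · have hrv : rv b i = gd b i := by unfold rv; rw [if_neg (fun hc => hg1 hc.1)]
    rw [if_neg (fun hc => hg1 (rv_one b i hc.1)), hrv]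
    by_cases hgn : gd b i = -1
    · rw [(w_neg_iff b b.length i).mpr (Or.inl hgn), hgn]
    · have hnb : ¬ burned b b.length i := by
        rintro (h | ⟨h1, -⟩)
        · exact hgn h
        · exact hg1 h1
      unfold w
      rw [if_neg hnb]

theorem rv_reverse (l : List Int) (t : ℕ) (ht : t < l.length) :
    rv l.reverse t = if gd l (l.length - 1 - t) = 1 ∧ RsrcP l (l.length - 1 - t) then -1
      else gd l (l.length - 1 - t) := by
  unfold rv
  rw [gd_reverse l t ht]
  by_cases hc : gd l (l.length - 1 - t) = 1 ∧ RsrcP l (l.length - 1 - t)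
  · rw [if_pos ⟨hc.1, (Lsrc_reverse l t ht).mpr hc.2⟩, if_pos hc]
  · rw [if_neg (fun hcc => hc ⟨hcc.1, (Lsrc_reverse l t ht).mp hcc.2⟩), if_neg hc]

theorem B_char (b : List Int) : propagacion_alt b = wlist b b.length := by
  unfold propagacion_alt wlist
  rw [sweep_char b, sweep_char]
  apply List.ext_getElem
  · simp
  · intro i h1 h2
    have hin : i < b.length := by simpa using h2
    rw [List.getElem_reverse]
    simp only [List.length_map, List.length_range, List.length_reverse]
    rw [List.getElem_map, List.getElem_range, List.getElem_map, List.getElem_range]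
    rw [rv_reverse _ _ (by simp; omega)]
    simp only [List.length_map, List.length_range]
    rw [show b.length - 1 - (b.length - 1 - i) = i by omega]
    rw [res_getD b i hin]
    exact final_val b i hin

-- ===== VERDICT (by name: the statement is the Claim_ definition above) =====
theorem propagacion_spec : Claim_equal_propagacion := by
  intro bosque _
  unfold Spec_propagacion
  rw [A_char, B_char]
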